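-- pv_equiv track=rewrite | github.com/PhiniteLab/pdf-to-markdown-pipeline | cortexmark/reference_eval.py | _status_metrics
-- ===== SOURCE A (Python) =====
-- from collections import Counter
--
-- LINK_STATUSES: tuple[str, ...] = ("resolved", "missing", "ambiguous")
--
-- def _status_metrics(
--     gold_links: Counter[tuple[str, str]],
--     pred_links: Counter[tuple[str, str]],
-- ) -> dict[str, int]:
--     counts: dict[str, int] = {}
--     for status in LINK_STATUSES:
--         keys = {item for item in gold_links if item[1] == status} | {item for item in pred_links if item[1] == status}
--         tp = fp = fn = 0
--         for key in keys:
--             gold_count = gold_links.get(key, 0)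
--             pred_count = pred_links.get(key, 0)
--             tp += min(gold_count, pred_count)
--             fp += max(pred_count - gold_count, 0)
--             fn += max(gold_count - pred_count, 0)
--         counts[f"{status}_tp"] = tp
--         counts[f"{status}_fp"] = fp
--         counts[f"{status}_fn"] = fn
--     return counts
-- ===== SOURCE B (Python) =====
-- from collections import Counter
--
-- LINK_STATUSES: tuple[str, ...] = ("resolved", "missing", "ambiguous")
--
-- def _status_metrics(gold_links, pred_links):
--     # One bucketing pass over the union of keys, accumulating into three Counters keyed by status.
--     tp: Counter[str] = Counter()
--     fp: Counter[str] = Counter()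
--     fn: Counter[str] = Counter()
--     for key in set(gold_links) | set(pred_links):
--         s = key[1]
--         g = gold_links.get(key, 0)
--         p = pred_links.get(key, 0)
--         tp[s] += min(g, p)
--         fp[s] += max(p - g, 0)
--         fn[s] += max(g - p, 0)
--     return {f"{s}_{m}": c for s in LINK_STATUSES for m, c in (("tp", tp[s]), ("fp", fp[s]), ("fn", fn[s]))}
-- ===== Notes on version B (the rewrite author's own statement) =====
-- stated objective: alternative
-- what changed: Replaces A's three per-status scans (each building its own filtered key set and re-iterating both counters) by a single bucketing pass over the union of all keys, accumulating tp/fp/fn into three status-keyed Counters, then emitting the nine entries.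
import Mathlib
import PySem

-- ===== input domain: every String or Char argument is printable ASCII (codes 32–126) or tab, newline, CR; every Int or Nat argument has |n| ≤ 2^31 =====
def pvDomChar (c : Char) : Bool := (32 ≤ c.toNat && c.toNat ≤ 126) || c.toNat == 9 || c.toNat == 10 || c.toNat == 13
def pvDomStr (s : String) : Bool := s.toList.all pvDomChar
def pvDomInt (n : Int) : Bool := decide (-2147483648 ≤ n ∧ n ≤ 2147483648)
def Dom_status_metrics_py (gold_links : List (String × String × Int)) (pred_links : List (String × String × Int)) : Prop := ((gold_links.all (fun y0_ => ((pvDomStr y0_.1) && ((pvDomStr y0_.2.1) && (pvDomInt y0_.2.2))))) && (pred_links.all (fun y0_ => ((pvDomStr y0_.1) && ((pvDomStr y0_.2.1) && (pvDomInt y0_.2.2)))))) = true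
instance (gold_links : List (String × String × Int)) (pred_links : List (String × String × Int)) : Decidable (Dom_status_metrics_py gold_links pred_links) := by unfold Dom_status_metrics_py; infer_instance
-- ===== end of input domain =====

-- B: one bucketing pass over the union of keys into three status-keyed Counters, instead of A's three per-status scans (objective: alternative decomposition).

-- shared input decoding: the flattened (k1, k2, v) list stands for the Python dict {(k1,k2): v}
def pvToDict (l : List (String × String × Int)) : PySem.Dict (String × String) Int :=
  l.foldl (fun d t => d.insert (t.1, t.2.1) t.2.2) PySem.Dict.empty

-- ===== PORT A =====
def status_metrics_py (gold_links : List (String × String × Int)) (pred_links : List (String × String × Int)) : List (String × Int) :=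
  let gd := pvToDict gold_links
  let pd := pvToDict pred_links
  (["resolved", "missing", "ambiguous"].foldl (fun (counts : PySem.Dict String Int) status =>
    let keys := PySem.Set.union (PySem.Set.ofList (gd.keys.filter (fun k => k.2 == status)))
                                (pd.keys.filter (fun k => k.2 == status))
    let r := keys.foldl (fun (acc : Int × Int × Int) key =>
        let gold_count := gd.getD key 0
        let pred_count := pd.getD key 0
        (acc.1 + min gold_count pred_count,
         acc.2.1 + max (pred_count - gold_count) 0,
         acc.2.2 + max (gold_count - pred_count) 0)) (0, 0, 0)
    ((counts.insert (status ++ "_tp") r.1).insert (status ++ "_fp") r.2.1).insert (status ++ "_fn") r.2.2)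
    PySem.Dict.empty).items

-- ===== PORT B =====
def status_metrics_py_alt (gold_links : List (String × String × Int)) (pred_links : List (String × String × Int)) : List (String × Int) :=
  let gd := pvToDict gold_links
  let pd := pvToDict pred_links
  let st := (PySem.Set.union (PySem.Set.ofList gd.keys) pd.keys).foldl
    (fun (acc : PySem.Dict String Int × PySem.Dict String Int × PySem.Dict String Int) key =>
      let s := key.2
      let g := gd.getD key 0
      let p := pd.getD key 0
      (acc.1.modify s 0 (· + min g p),
       acc.2.1.modify s 0 (· + max (p - g) 0),
       acc.2.2.modify s 0 (· + max (g - p) 0)))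
    (PySem.Dict.empty, PySem.Dict.empty, PySem.Dict.empty)
  (["resolved", "missing", "ambiguous"].map (fun s =>
    [(s ++ "_tp", st.1.getD s 0), (s ++ "_fp", st.2.1.getD s 0), (s ++ "_fn", st.2.2.getD s 0)])).flatten

-- ===== PRECONDITION & SPEC =====
def Spec_status_metrics_py (gold_links : List (String × String × Int)) (pred_links : List (String × String × Int)) (out : List (String × Int)) : Prop := out = status_metrics_py_alt gold_links pred_links
instance (gold_links : List (String × String × Int)) (pred_links : List (String × String × Int)) (out : List (String × Int)) : Decidable (Spec_status_metrics_py gold_links pred_links out) := by unfold Spec_status_metrics_py; infer_instance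

-- ===== CLAIM (what is proved, stated in full; the proofs are below) =====
def Claim_equal_status_metrics_py : Prop := ∀ (gold_links : List (String × String × Int)) (pred_links : List (String × String × Int)), Dom_status_metrics_py gold_links pred_links → Spec_status_metrics_py gold_links pred_links (status_metrics_py gold_links pred_links)

-- ===== LEMMAS AND PROOFS =====

-- A's inner accumulation is the componentwise sum of the three contributions
theorem pv_foldA (gd pd : PySem.Dict (String × String) Int) (l : List (String × String)) (a : Int × Int × Int) :
    l.foldl (fun (acc : Int × Int × Int) key =>
        (acc.1 + min (gd.getD key 0) (pd.getD key 0),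
         acc.2.1 + max (pd.getD key 0 - gd.getD key 0) 0,
         acc.2.2 + max (gd.getD key 0 - pd.getD key 0) 0)) a
      = (a.1 + (l.map (fun k => min (gd.getD k 0) (pd.getD k 0))).sum,
         a.2.1 + (l.map (fun k => max (pd.getD k 0 - gd.getD k 0) 0)).sum,
         a.2.2 + (l.map (fun k => max (gd.getD k 0 - pd.getD k 0) 0)).sum) := by
  induction l generalizing a with
  | nil => simp
  | cons k l ih => simp [ih]; omega

-- B's fold over the triple of Counters splits into three independent folds
theorem pv_fold_triple (gd pd : PySem.Dict (String × String) Int) (l : List (String × String))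
    (a b c : PySem.Dict String Int) :
    l.foldl (fun (acc : PySem.Dict String Int × PySem.Dict String Int × PySem.Dict String Int) key =>
        (acc.1.modify key.2 0 (· + min (gd.getD key 0) (pd.getD key 0)),
         acc.2.1.modify key.2 0 (· + max (pd.getD key 0 - gd.getD key 0) 0),
         acc.2.2.modify key.2 0 (· + max (gd.getD key 0 - pd.getD key 0) 0))) (a, b, c)
      = (l.foldl (fun d k => d.modify k.2 0 (· + min (gd.getD k 0) (pd.getD k 0))) a,
         l.foldl (fun d k => d.modify k.2 0 (· + max (pd.getD k 0 - gd.getD k 0) 0)) b,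
         l.foldl (fun d k => d.modify k.2 0 (· + max (gd.getD k 0 - pd.getD k 0) 0)) c) := by
  induction l generalizing a b c with
  | nil => rfl
  | cons k l ih => simp [ih]

-- B's bucketing pass read back at a status string = the sum over the keys of that status
theorem pv_getD_fold_modify (l : List (String × String)) (f : (String × String) → Int)
    (d : PySem.Dict String Int) (s : String) :
    (l.foldl (fun d k => d.modify k.2 0 (fun x => x + f k)) d).getD s 0
      = d.getD s 0 + ((l.filter (fun k => k.2 == s)).map f).sum := by
  induction l generalizing d with
  | nil => simp
  | cons k l ih =>
    rw [List.foldl_cons, ih, PySem.Dict.getD_modify]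
    by_cases h : s = k.2
    · simp [h]; omega
    · have h' : (k.2 == s) = false := by simp [Ne.symm h]
      simp [h, h']

-- A's per-status key set is a permutation of B's union filtered by that status
theorem pv_keys_perm (gd pd : PySem.Dict (String × String) Int) (s : String) :
    (PySem.Set.union (PySem.Set.ofList (gd.keys.filter (fun k => k.2 == s)))
        (pd.keys.filter (fun k => k.2 == s))).Perm
      ((PySem.Set.union (PySem.Set.ofList gd.keys) pd.keys).filter (fun k => k.2 == s)) := by
  rw [List.perm_ext_iff_of_nodup]
  · intro x
    simp only [PySem.Set.mem_union, PySem.Set.mem_ofList, List.mem_filter]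
    tauto
  · exact PySem.Set.nodup_union _ _ (PySem.Set.nodup_ofList _)
  · exact (PySem.Set.nodup_union _ _ (PySem.Set.nodup_ofList _)).filter _

theorem pv_sum_keys (gd pd : PySem.Dict (String × String) Int) (s : String) (f : (String × String) → Int) :
    ((PySem.Set.union (PySem.Set.ofList (gd.keys.filter (fun k => k.2 == s)))
        (pd.keys.filter (fun k => k.2 == s))).map f).sum
      = (((PySem.Set.union (PySem.Set.ofList gd.keys) pd.keys).filter (fun k => k.2 == s)).map f).sum :=
  ((pv_keys_perm gd pd s).map f).sum_eq

theorem pv_main (gold_links pred_links : List (String × String × Int)) :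
    status_metrics_py gold_links pred_links = status_metrics_py_alt gold_links pred_links := by
  unfold status_metrics_py status_metrics_py_alt
  simp only [List.foldl_cons, List.foldl_nil, List.map_cons, List.map_nil, List.flatten]
  rw [pv_fold_triple]
  rw [pv_foldA, pv_foldA, pv_foldA]
  rw [pv_getD_fold_modify, pv_getD_fold_modify, pv_getD_fold_modify,
      pv_getD_fold_modify, pv_getD_fold_modify, pv_getD_fold_modify,
      pv_getD_fold_modify, pv_getD_fold_modify, pv_getD_fold_modify]
  rw [pv_sum_keys, pv_sum_keys, pv_sum_keys, pv_sum_keys, pv_sum_keys,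
      pv_sum_keys, pv_sum_keys, pv_sum_keys, pv_sum_keys]
  simp [PySem.Dict.insert, PySem.Dict.contains, PySem.Dict.empty, PySem.Dict.getD, PySem.Dict.get?]

-- ===== VERDICT (by name: the statement is the Claim_ definition above) =====
theorem status_metrics_py_spec : Claim_equal_status_metrics_py := by
  intro g p _
  unfold Spec_status_metrics_py
  exact pv_main g p
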